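-- pv_equiv track=rewrite | github.com/robpearc/novadb | src/novadb/processing/curation/bioassembly.py | parse_operator_expression
-- ===== SOURCE A (Python) =====
-- from typing import (
--     Any,
--     Dict,
--     FrozenSet,
--     Iterator,
--     List,
--     Optional,
--     Sequence,
--     Set,
--     Tuple,
--     Union,
-- )
--
-- def parse_operator_expression(expression: str) -> List[str]:
--     """Parse PDB operator expression like '1,2,3' or '(1-5)'.
--
--     PDB uses expressions like:
--     - "1" - single operator
--     - "1,2,3" - list of operators
--     - "(1-5)" - range of operators
--     - "(1-3)(4-6)" - Cartesian product (combined operators)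
--
--     Args:
--         expression: Operator expression string
--
--     Returns:
--         List of operator IDs
--     """
--     expression = expression.strip()
--
--     # Handle Cartesian product notation: (1-3)(4-6)
--     if ")(" in expression:
--         parts = expression.split(")(")
--         parts[0] = parts[0].lstrip("(")
--         parts[-1] = parts[-1].rstrip(")")
--
--         # Parse each part
--         part_ids = [_parse_single_expression(p) for p in parts]
--
--         # Generate Cartesian product
--         result = [""]
--         for ids in part_ids:
--             new_result = []
--             for prefix in result:
--                 for op_id in ids:
--                     sep = "_" if prefix else ""
--                     new_result.append(f"{prefix}{sep}{op_id}")
--             result = new_result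
--
--         return result
--
--     return _parse_single_expression(expression)
--
-- def _parse_single_expression(expression: str) -> List[str]:
--     """Parse a single operator expression (no Cartesian product)."""
--     expression = expression.strip("()")
--     operator_ids = []
--
--     for part in expression.split(","):
--         part = part.strip()
--         if not part:
--             continue
--
--         if "-" in part and not part.startswith("-"):
--             # Range like "1-5"
--             try:
--                 start, end = part.split("-", 1)
--                 for i in range(int(start), int(end) + 1):
--                     operator_ids.append(str(i))
--             except ValueError:
--                 operator_ids.append(part)
--         else:
--             operator_ids.append(part)
--
--     return operator_ids
-- ===== SOURCE B (Python) =====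
-- def _expand(part):
--     """Expand one comma-separated item: a 'a-b' numeric range, else the item itself."""
--     pieces = part.split("-", 1)
--     if len(pieces) == 2:
--         try:
--             return [str(i) for i in range(int(pieces[0]), int(pieces[1]) + 1)]
--         except ValueError:
--             pass
--     return [part]
--
--
-- def _parse_single_expression(expression):
--     stripped = expression.strip("()")
--     return [op
--             for raw in stripped.split(",")
--             if raw.strip()
--             for op in _expand(raw.strip())]
--
--
-- def _product(blocks):
--     if not blocks:
--         return [[]]
--     first, *rest = blocks
--     tails = _product(rest)
--     return [[x] + t for x in first for t in tails]
--
--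
-- def parse_operator_expression(expression):
--     expression = expression.strip()
--     if ")(" not in expression:
--         return _parse_single_expression(expression)
--     parts = expression.split(")(")
--     parts[0] = parts[0].lstrip("(")
--     parts[-1] = parts[-1].rstrip(")")
--     part_ids = [_parse_single_expression(p) for p in parts]
--     return ["_".join(combo) for combo in _product(part_ids)]
-- ===== Notes on version B (the rewrite author's own statement) =====
-- stated objective: idiomatic
-- what changed: The per-item membership/startswith tests and append-accumulator loops are replaced by a split-once _expand helper used from a flattening comprehension, and the prefix-accumulating Cartesian-product fold is replaced by a recursive product generator whose combinations are joined with the underscore separator directly.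
import Mathlib
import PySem

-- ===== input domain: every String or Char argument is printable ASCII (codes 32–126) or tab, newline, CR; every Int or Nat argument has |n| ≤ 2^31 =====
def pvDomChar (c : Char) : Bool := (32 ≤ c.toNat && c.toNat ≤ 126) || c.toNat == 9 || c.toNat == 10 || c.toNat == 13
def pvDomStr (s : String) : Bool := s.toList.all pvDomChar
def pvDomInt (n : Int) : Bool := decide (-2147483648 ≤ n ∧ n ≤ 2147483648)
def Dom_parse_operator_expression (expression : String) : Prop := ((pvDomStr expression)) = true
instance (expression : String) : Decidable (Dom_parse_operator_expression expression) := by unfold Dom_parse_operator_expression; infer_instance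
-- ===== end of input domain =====

-- B replaces A's membership/startswith tests and append-accumulator loops by a split-once helper,
-- a flattening comprehension, and a recursive Cartesian product joined with the underscore separator (idiomatic decomposition, same cost).


-- ===== PORT A =====
-- helpers shared by both ports because both Python sources contain the identical lines
-- parts[0] = parts[0].lstrip("("); parts[-1] = parts[-1].rstrip(")")
def pvLStripParen (s : List Char) : List Char := s.dropWhile (fun c => c == '(')  -- exact: lstrip("(") drops all leading '('
def pvRStripParen (s : List Char) : List Char := (s.reverse.dropWhile (fun c => c == ')')).reverse  -- exact: rstrip(")") drops all trailing ')'
def pvSetLast (f : List Char → List Char) : List (List Char) → List (List Char)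
  | [] => []
  | [x] => [f x]
  | x :: xs => x :: pvSetLast f xs

-- A's _parse_single_expression: an accumulator loop over the comma-split parts
def pvParseSingleA (expression : List Char) : List (List Char) :=
  let e := PySem.Chars.stripChars expression ['(', ')']
  (PySem.Chars.splitOn e [',']).foldl (fun acc part =>
    let p := PySem.Chars.strip part
    if p = [] then acc
    else if PySem.Chars.isIn ['-'] p && !(PySem.Chars.startswith p ['-']) then
      match PySem.Chars.splitOnMax p ['-'] 1 with
      | [s1, s2] =>
        match PySem.Int.ofChars? s1, PySem.Int.ofChars? s2 with
        | some a, some b => acc ++ (PySem.List.pyRange a (b + 1) 1).map PySem.Int.toChars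
        | _, _ => acc ++ [p]       -- except ValueError (an int() failed)
      | _ => acc ++ [p]            -- except ValueError (unpacking failed)
    else acc ++ [p]) []

def parse_operator_expression (expression : String) : List String :=
  let e := PySem.Chars.strip expression.toList
  if PySem.Chars.isIn [')', '('] e then
    match PySem.Chars.splitOn e [')', '('] with
    | [] => []                     -- unreachable: split never returns an empty list
    | p0 :: rest =>
      let parts := pvSetLast pvRStripParen (pvLStripParen p0 :: rest)
      let part_ids := parts.map pvParseSingleA
      -- result = [""]; for ids in part_ids: prefix-product accumulator
      let result := part_ids.foldl (fun result ids =>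
        result.foldl (fun new_result pre =>
          ids.foldl (fun nr op =>
            nr ++ [pre ++ (if pre = [] then [] else ['_']) ++ op]) new_result) []) [[]]
      result.map String.mk
  else (pvParseSingleA e).map String.mk

-- ===== PORT B =====
-- B's _expand: split once at '-', emit the range if both halves parse as ints, else the item
def pvExpand (part : List Char) : List (List Char) :=
  match PySem.Chars.splitOnMax part ['-'] 1 with
  | [s1, s2] =>
    match PySem.Int.ofChars? s1, PySem.Int.ofChars? s2 with
    | some a, some b => (PySem.List.pyRange a (b + 1) 1).map PySem.Int.toChars
    | _, _ => [part]               -- except ValueError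
  | _ => [part]                    -- len(pieces) != 2

-- B's _parse_single_expression: a flattening comprehension
def pvParseSingleB (expression : List Char) : List (List Char) :=
  (PySem.Chars.splitOn (PySem.Chars.stripChars expression ['(', ')']) [',']).flatMap
    (fun raw => if PySem.Chars.strip raw = [] then [] else pvExpand (PySem.Chars.strip raw))

-- B's _product: recursive Cartesian product
def pvProduct : List (List (List Char)) → List (List (List Char))
  | [] => [[]]
  | first :: rest => first.flatMap (fun x => (pvProduct rest).map (fun t => x :: t))

def parse_operator_expression_alt (expression : String) : List String :=
  let e := PySem.Chars.strip expression.toList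
  if !(PySem.Chars.isIn [')', '('] e) then (pvParseSingleB e).map String.mk
  else
    match PySem.Chars.splitOn e [')', '('] with
    | [] => []
    | p0 :: rest =>
      let parts := pvSetLast pvRStripParen (pvLStripParen p0 :: rest)
      let part_ids := parts.map pvParseSingleB
      ((pvProduct part_ids).map (fun combo => PySem.Chars.join ['_'] combo)).map String.mk

-- ===== PRECONDITION & SPEC =====
def Spec_parse_operator_expression (expression : String) (out : List String) : Prop := out = parse_operator_expression_alt expression
instance (expression : String) (out : List String) : Decidable (Spec_parse_operator_expression expression out) := by unfold Spec_parse_operator_expression; infer_instance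

-- ===== CLAIM (what is proved, stated in full; the proofs are below) =====
def Claim_equal_parse_operator_expression : Prop := ∀ (expression : String), Dom_parse_operator_expression expression → Spec_parse_operator_expression expression (parse_operator_expression expression)

-- ===== LEMMAS AND PROOFS =====

-- split("-", 1): the go loop with the split budget exhausted copies the remainder
theorem pv_go_zero (fuel : Nat) (l cur : List Char) (accs : List (List Char)) :
    PySem.Chars.splitOnMax.go ['-'] fuel 0 l cur accs = ((cur.reverse ++ l) :: accs).reverse := by
  cases fuel with
  | zero => simp [PySem.Chars.splitOnMax.go]
  | succ f => cases l with
    | nil => simp [PySem.Chars.splitOnMax.go]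
    | cons c rest => simp [PySem.Chars.splitOnMax.go]

-- split("-", 1): the go loop with budget 1 splits at the first '-' if any
theorem pv_go_one (l : List Char) : ∀ (fuel : Nat) (cur : List Char) (accs : List (List Char)),
    l.length < fuel →
    PySem.Chars.splitOnMax.go ['-'] fuel 1 l cur accs =
      (if '-' ∈ l then
        accs.reverse ++ [cur.reverse ++ l.takeWhile (fun c => c ≠ '-'), (l.dropWhile (fun c => c ≠ '-')).tail]
      else accs.reverse ++ [cur.reverse ++ l]) := by
  induction l with
  | nil =>
    intro fuel cur accs h
    cases fuel with
    | zero => omega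
    | succ f => simp [PySem.Chars.splitOnMax.go]
  | cons c rest ih =>
    intro fuel cur accs h
    cases fuel with
    | zero => omega
    | succ f =>
      by_cases hc : c = '-'
      · subst hc
        have h1 : PySem.Chars.splitOnMax.go ['-'] (f + 1) 1 ('-' :: rest) cur accs =
            PySem.Chars.splitOnMax.go ['-'] f 0 rest [] (cur.reverse :: accs) := by
          simp [PySem.Chars.splitOnMax.go, List.isPrefixOf]
        rw [h1, pv_go_zero]
        simp
      · have h1 : PySem.Chars.splitOnMax.go ['-'] (f + 1) 1 (c :: rest) cur accs =
            PySem.Chars.splitOnMax.go ['-'] f 1 rest (c :: cur) accs := by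
          simp [PySem.Chars.splitOnMax.go, List.isPrefixOf, Ne.symm hc]
        rw [h1, ih f (c :: cur) accs (by simpa using Nat.lt_of_succ_lt_succ h)]
        simp only [List.mem_cons, List.takeWhile_cons, List.dropWhile_cons]
        simp [hc, Ne.symm hc]

theorem pv_split_dash (p : List Char) :
    PySem.Chars.splitOnMax p ['-'] 1 =
      (if '-' ∈ p then [p.takeWhile (fun c => c ≠ '-'), (p.dropWhile (fun c => c ≠ '-')).tail]
       else [p]) := by
  have h := pv_go_one p (p.length + 1) [] [] (by omega)
  simp only [PySem.Chars.splitOnMax]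
  norm_num at h ⊢
  exact h

theorem pv_isIn_dash (p : List Char) : PySem.Chars.isIn ['-'] p = true ↔ '-' ∈ p := by
  rw [PySem.Chars.isIn_iff_infix]
  exact List.singleton_infix_iff '-' p

theorem pv_toChars_ne (n : Int) : PySem.Int.toChars n ≠ [] := by
  unfold PySem.Int.toChars
  split
  · simp
  · intro h
    have := Nat.length_toDigits_pos (b := 10) (n := n.toNat)
    simp [h] at this

-- per-part agreement between A's loop body and B's _expand
theorem pv_part_eq (p : List Char) (hp : p ≠ []) :
    (if PySem.Chars.isIn ['-'] p && !(PySem.Chars.startswith p ['-']) then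
      match PySem.Chars.splitOnMax p ['-'] 1 with
      | [s1, s2] =>
        match PySem.Int.ofChars? s1, PySem.Int.ofChars? s2 with
        | some a, some b => (PySem.List.pyRange a (b + 1) 1).map PySem.Int.toChars
        | _, _ => [p]
      | _ => [p]
    else [p]) = pvExpand p := by
  obtain ⟨c, t, rfl⟩ : ∃ c t, p = c :: t := by
    cases p with
    | nil => exact absurd rfl hp
    | cons c t => exact ⟨c, t, rfl⟩
  by_cases hc : c = '-'
  · subst hc
    have hsw : PySem.Chars.startswith ('-' :: t) ['-'] = true := by
      simp [PySem.Chars.startswith, List.isPrefixOf]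
    rw [hsw]
    simp only [Bool.not_true, Bool.and_false]
    unfold pvExpand
    rw [pv_split_dash]
    simp only [List.mem_cons, true_or, if_true, List.takeWhile_cons]
    norm_num
    rw [show PySem.Int.ofChars? ([] : List Char) = none from by decide]
  · have hsw : PySem.Chars.startswith (c :: t) ['-'] = false := by
      simp [PySem.Chars.startswith, List.isPrefixOf, Ne.symm hc]
    rw [hsw]
    by_cases hm : '-' ∈ c :: t
    · have hin : PySem.Chars.isIn ['-'] (c :: t) = true := (pv_isIn_dash _).mpr hm
      rw [hin]
      unfold pvExpand
      rw [pv_split_dash, if_pos hm]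
      simp
    · have hin : PySem.Chars.isIn ['-'] (c :: t) = false := by
        cases h : PySem.Chars.isIn ['-'] (c :: t)
        · rfl
        · exact absurd ((pv_isIn_dash _).mp h) hm
      rw [hin]
      unfold pvExpand
      rw [pv_split_dash, if_neg hm]
      simp

-- the two single-expression parsers agree
theorem pv_parse_single_eq (e : List Char) : pvParseSingleA e = pvParseSingleB e := by
  unfold pvParseSingleA pvParseSingleB
  have hbody : (fun (acc : List (List Char)) (part : List Char) =>
      let p := PySem.Chars.strip part
      if p = [] then acc
      else if PySem.Chars.isIn ['-'] p && !(PySem.Chars.startswith p ['-']) then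
        match PySem.Chars.splitOnMax p ['-'] 1 with
        | [s1, s2] =>
          match PySem.Int.ofChars? s1, PySem.Int.ofChars? s2 with
          | some a, some b => acc ++ (PySem.List.pyRange a (b + 1) 1).map PySem.Int.toChars
          | _, _ => acc ++ [p]
        | _ => acc ++ [p]
      else acc ++ [p]) =
      (fun acc part => acc ++
        (if PySem.Chars.strip part = [] then []
         else pvExpand (PySem.Chars.strip part))) := by
    funext acc part
    by_cases hp : PySem.Chars.strip part = []
    · simp [hp]
    · rw [← pv_part_eq _ hp]
      simp only [hp, if_neg, if_false]
      split_ifs with h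
      · cases hs : PySem.Chars.splitOnMax (PySem.Chars.strip part) ['-'] 1 with
        | nil => simp [hs]
        | cons a l => cases l with
          | nil => simp [hs]
          | cons b l2 => cases l2 with
            | nil =>
              cases h1 : PySem.Int.ofChars? a <;> cases h2 : PySem.Int.ofChars? b <;> simp [hs, h1, h2]
            | cons x l3 => simp [hs]
      · simp
  rw [hbody, PySem.List.foldl_append_eq_flatMap]
  simp

-- every operator id produced by the single-expression parser is nonempty
theorem pv_expand_ne (p : List Char) (hp : p ≠ []) : ∀ x ∈ pvExpand p, x ≠ [] := by
  intro x hx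
  unfold pvExpand at hx
  rcases hs : PySem.Chars.splitOnMax p ['-'] 1 with _ | ⟨a, _ | ⟨b, _ | ⟨c, l⟩⟩⟩ <;> rw [hs] at hx
  · simp at hx; simpa [hx]
  · simp at hx; simpa [hx]
  · cases h1 : PySem.Int.ofChars? a <;> cases h2 : PySem.Int.ofChars? b <;>
      simp [h1, h2] at hx
    · simpa [hx]
    · simpa [hx]
    · simpa [hx]
    · obtain ⟨i, _, rfl⟩ := hx
      exact pv_toChars_ne i
  · simp at hx; simpa [hx]

theorem pv_single_ne (e : List Char) : ∀ x ∈ pvParseSingleB e, x ≠ [] := by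
  intro x hx
  unfold pvParseSingleB at hx
  simp only [List.mem_flatMap] at hx
  obtain ⟨raw, _, hmem⟩ := hx
  by_cases hp : PySem.Chars.strip raw = []
  · simp [hp] at hmem
  · rw [if_neg hp] at hmem
    exact pv_expand_ne _ hp x hmem

-- inner double loop of A's product accumulator, as a flatMap
theorem pv_step_eq (R ids : List (List Char)) :
    R.foldl (fun new_result pre =>
      ids.foldl (fun nr op =>
        nr ++ [pre ++ (if pre = [] then [] else ['_']) ++ op]) new_result) [] =
    R.flatMap (fun pre => ids.map (fun op => pre ++ (if pre = [] then [] else ['_']) ++ op)) := by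
  have h1 : ∀ (pre : List Char) (nr : List (List Char)),
      ids.foldl (fun nr op => nr ++ [pre ++ (if pre = [] then [] else ['_']) ++ op]) nr =
      nr ++ ids.map (fun op => pre ++ (if pre = [] then [] else ['_']) ++ op) :=
    fun pre nr => PySem.List.foldl_append_singleton_eq_map _ ids nr
  calc R.foldl (fun new_result pre =>
        ids.foldl (fun nr op =>
          nr ++ [pre ++ (if pre = [] then [] else ['_']) ++ op]) new_result) []
      = R.foldl (fun nr pre =>
          nr ++ ids.map (fun op => pre ++ (if pre = [] then [] else ['_']) ++ op)) [] := by
        simp only [h1]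
    _ = _ := by rw [PySem.List.foldl_append_eq_flatMap]; rfl

-- joining after prepending "pre_" is joining with pre in front (pre nonempty)
theorem pv_join_cons (pre x : List Char) (hpre : pre ≠ []) (t : List (List Char)) :
    PySem.Chars.join ['_'] ((pre ++ ['_'] ++ x) :: t) = PySem.Chars.join ['_'] (pre :: x :: t) := by
  cases t with
  | nil => rw [PySem.Chars.join_singleton, PySem.Chars.join_cons_cons, PySem.Chars.join_singleton]
  | cons y t' =>
    rw [PySem.Chars.join_cons_cons, PySem.Chars.join_cons_cons, PySem.Chars.join_cons_cons]
    simp [List.append_assoc]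

-- A's accumulator fold equals '_'.join over the Cartesian product, for nonempty prefixes
theorem pv_fold_eq_product (pids : List (List (List Char))) :
    ∀ R : List (List Char), (∀ r ∈ R, r ≠ []) →
    pids.foldl (fun result ids =>
      result.foldl (fun new_result pre =>
        ids.foldl (fun nr op =>
          nr ++ [pre ++ (if pre = [] then [] else ['_']) ++ op]) new_result) []) R =
    R.flatMap (fun pre => (pvProduct pids).map (fun combo => PySem.Chars.join ['_'] (pre :: combo))) := by
  induction pids with
  | nil =>
    intro R hR
    simp only [List.foldl_nil, pvProduct, List.map_cons, List.map_nil, PySem.Chars.join_singleton]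
    exact (List.flatMap_singleton' R).symm
  | cons ids rest ih =>
    intro R hR
    rw [List.foldl_cons, pv_step_eq]
    rw [ih _ (by
      intro r hr
      simp only [List.mem_flatMap, List.mem_map] at hr
      obtain ⟨pre, hpre, op, _, rfl⟩ := hr
      have : pre ≠ [] := hR pre hpre
      simp [this])]
    rw [List.flatMap_assoc]
    apply List.flatMap_congr
    intro pre hpre
    have hpne : pre ≠ [] := hR pre hpre
    rw [List.flatMap_map]
    show ids.flatMap _ = ((pvProduct (ids :: rest)).map _)
    rw [show pvProduct (ids :: rest) = ids.flatMap (fun x => (pvProduct rest).map (fun t => x :: t)) from rfl]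
    rw [List.map_flatMap]
    apply List.flatMap_congr
    intro x hx
    rw [List.map_map]
    apply List.map_congr_left
    intro t ht
    simp only [Function.comp_apply, Function.comp_def]
    rw [if_neg hpne]
    exact pv_join_cons pre x hpne t

theorem pv_setLast_cons (f : List Char → List Char) (x : List Char) (xs : List (List Char)) :
    ∃ q qs, pvSetLast f (x :: xs) = q :: qs := by
  cases xs with
  | nil => exact ⟨f x, [], rfl⟩
  | cons y ys => exact ⟨x, pvSetLast f (y :: ys), rfl⟩

theorem pv_main (s : String) : parse_operator_expression s = parse_operator_expression_alt s := by
  unfold parse_operator_expression parse_operator_expression_alt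
  have hAB : pvParseSingleA = pvParseSingleB := funext pv_parse_single_eq
  by_cases hin : PySem.Chars.isIn [')', '('] (PySem.Chars.strip s.toList) = true
  · have hnot : ¬((!PySem.Chars.isIn [')', '('] (PySem.Chars.strip s.toList)) = true) := by
      simp [hin]
    rw [if_pos hin, if_neg hnot]
    cases hsp : PySem.Chars.splitOn (PySem.Chars.strip s.toList) [')', '('] with
    | nil => rfl
    | cons p0 rest =>
      dsimp only
      obtain ⟨q, qs, hq⟩ := pv_setLast_cons pvRStripParen (pvLStripParen p0) rest
      rw [hAB, hq]
      congr 1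
      rw [List.map_cons, List.foldl_cons, pv_step_eq]
      have h0 : ([[]] : List (List Char)).flatMap
          (fun pre => (pvParseSingleB q).map (fun op => pre ++ (if pre = [] then [] else ['_']) ++ op)) =
          pvParseSingleB q := by simp
      rw [h0, pv_fold_eq_product _ _ (pv_single_ne q)]
      rw [show pvProduct (pvParseSingleB q :: qs.map pvParseSingleB) =
        (pvParseSingleB q).flatMap (fun x => (pvProduct (qs.map pvParseSingleB)).map (fun t => x :: t)) from rfl]
      rw [List.map_flatMap]
      apply List.flatMap_congr
      intro x hx
      rw [List.map_map]
      rfl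
  · have hnot : (!PySem.Chars.isIn [')', '('] (PySem.Chars.strip s.toList)) = true := by
      simp [Bool.not_eq_true _ ▸ hin]
    rw [if_neg hin, if_pos hnot, hAB]

-- ===== VERDICT (by name: the statement is the Claim_ definition above) =====
theorem parse_operator_expression_spec : Claim_equal_parse_operator_expression := by
  intro expression _
  exact pv_main expression
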